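-- pv_equiv track=rewrite | github.com/sdogan13/ipwatchai | utils/phonetic.py | _extract_first_syllable
-- ===== SOURCE A (Python) =====
-- def _extract_first_syllable(text: str) -> str:
--     """Extract the onset + first vowel cluster of a word.
--
--     For trademark law, the initial impression (first syllable) carries
--     disproportionate weight in confusion analysis.
--
--     Examples:
--         "samsung" -> "sam"
--         "nike" -> "ni"
--         "apple" -> "ap"
--         "google" -> "goo"
--     """
--     if not text:
--         return ""
--
--     # For multi-word, use first word only
--     word = text.split()[0] if ' ' in text else text
--
--     result = []
--     found_vowel = False
--
--     for c in word:
--         is_vowel = c in 'aeiouy'  # ASCII-folded vowels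
--         if found_vowel and not is_vowel:
--             # Hit consonant after vowel — include it and stop
--             result.append(c)
--             break
--         result.append(c)
--         if is_vowel:
--             found_vowel = True
--
--     return ''.join(result)
-- ===== SOURCE B (Python) =====
-- def _extract_first_syllable(text: str) -> str:
--     if not text:
--         return ""
--
--     word = text.split()[0] if ' ' in text else text
--     vowels = 'aeiouy'
--
--     i = next((k for k, c in enumerate(word) if c in vowels), None)
--     if i is None:
--         # No vowel at all: the whole word is returned.
--         return word
--     j = next((k for k in range(i, len(word)) if word[k] not in vowels), None)
--     if j is None:
--         # Word ends inside the vowel cluster.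
--         return word
--     # Onset + vowel cluster + one following consonant.
--     return word[:j + 1]
-- ===== Notes on version B (the rewrite author's own statement) =====
-- stated objective: alternative
-- what changed: Replaces the single flag-carrying scan (found_vowel state, append-and-break) with an index-based decomposition: find the first vowel index, then the first non-vowel index after it, and return one slice word[:j+1] (or the whole word when a search fails).
-- outside the precondition, e.g. on _extract_first_syllable(' '): A raises IndexError, B raises IndexError
import Mathlib
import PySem

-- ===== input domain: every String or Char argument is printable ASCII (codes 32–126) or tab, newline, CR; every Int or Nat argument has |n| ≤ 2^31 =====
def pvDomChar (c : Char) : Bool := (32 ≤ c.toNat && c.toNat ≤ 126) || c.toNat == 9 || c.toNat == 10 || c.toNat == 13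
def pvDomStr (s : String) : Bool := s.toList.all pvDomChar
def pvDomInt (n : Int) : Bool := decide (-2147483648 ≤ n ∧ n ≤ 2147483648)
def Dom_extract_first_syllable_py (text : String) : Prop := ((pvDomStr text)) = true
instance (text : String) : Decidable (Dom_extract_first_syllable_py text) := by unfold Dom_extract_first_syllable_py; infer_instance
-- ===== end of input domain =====

-- B replaces A's flag-carrying scan by two index searches and one slice; same behaviour, alternative structure (not faster).

-- ===== PORT A =====
-- `c in 'aeiouy'` for a single character c is exactly membership in these six characters
def pvIsVowelA (c : Char) : Bool := ['a', 'e', 'i', 'o', 'u', 'y'].contains c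

-- the for-loop of A: state = (result, found_vowel); `break` after appending ends the recursion
def pvLoopA (cs : List Char) (result : List Char) (found : Bool) : List Char :=
  match cs with
  | [] => result
  | c :: rest =>
    let isV := pvIsVowelA c
    if found && !isV then result ++ [c]
    else pvLoopA rest (result ++ [c]) (found || isV)

def extract_first_syllable_py (text : String) : String :=
  if text = "" then ""
  else
    -- text.split()[0] raises IndexError when the list is empty: excluded by Pre_ ("" branch unreachable)
    let word := if PySem.Str.isIn " " text then
        (match PySem.Str.split₀ text with | w :: _ => w | [] => "")
      else text
    String.ofList (pvLoopA word.toList [] false)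

-- ===== PORT B =====
def pvIsVowelB (c : Char) : Bool := ['a', 'e', 'i', 'o', 'u', 'y'].contains c

def extract_first_syllable_py_alt (text : String) : String :=
  if text = "" then ""
  else
    -- same word computation (and the same IndexError, excluded by Pre_)
    let word := if PySem.Str.isIn " " text then
        (match PySem.Str.split₀ text with | w :: _ => w | [] => "")
      else text
    let cs := word.toList
    -- i = next((k for k, c in enumerate(word) if c in vowels), None)
    match cs.findIdx? (fun c => pvIsVowelB c) with
    | none => word
    | some i =>
      -- j = next((k for k in range(i, len(word)) if word[k] not in vowels), None): absolute j = i + d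
      match (cs.drop i).findIdx? (fun c => !pvIsVowelB c) with
      | none => word
      | some d => String.ofList (cs.take (i + d + 1))   -- word[:j+1] with j+1 ≥ 0 is take

-- ===== PRECONDITION & SPEC =====
-- Pre_ excludes exactly the inputs where A raises IndexError: text containing ' ' whose characters
-- are all whitespace (then text.split() is empty).  B raises there too.
def Pre_extract_first_syllable_py (text : String) : Prop :=
  PySem.Str.isIn " " text = true → text.toList.any (fun c => !PySem.Chars.isspace c) = true
instance (text : String) : Decidable (Pre_extract_first_syllable_py text) := by
  unfold Pre_extract_first_syllable_py; infer_instance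
def pvWitness_extract_first_syllable_py : String := "samsung"

def Spec_extract_first_syllable_py (text : String) (out : String) : Prop := out = extract_first_syllable_py_alt text
instance (text : String) (out : String) : Decidable (Spec_extract_first_syllable_py text out) := by unfold Spec_extract_first_syllable_py; infer_instance

-- ===== CLAIM (what is proved, stated in full; the proofs are below) =====
def Claim_equal_extract_first_syllable_py : Prop := ∀ (text : String), Dom_extract_first_syllable_py text → Pre_extract_first_syllable_py text → Spec_extract_first_syllable_py text (extract_first_syllable_py text)

-- ===== LEMMAS AND PROOFS =====

lemma pvIsVowelB_eq : pvIsVowelB = pvIsVowelA := rfl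

-- A's loop once a vowel has been seen: copies the remaining vowel run plus one consonant
lemma pvLoopA_true (cs acc : List Char) :
    pvLoopA cs acc true =
      acc ++ (match cs.findIdx? (fun c => !pvIsVowelA c) with
              | none => cs
              | some d => cs.take (d + 1)) := by
  induction cs generalizing acc with
  | nil => simp [pvLoopA]
  | cons c rest ih =>
    by_cases hv : pvIsVowelA c = true
    · simp [pvLoopA, hv, List.findIdx?_cons, ih]
      cases rest.findIdx? (fun c => !pvIsVowelA c) <;> simp
    · simp at hv
      simp [pvLoopA, hv, List.findIdx?_cons]

-- A's loop from the initial state equals B's two-search-and-slice computation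
lemma pvLoopA_false (cs acc : List Char) :
    pvLoopA cs acc false =
      acc ++ (match cs.findIdx? (fun c => pvIsVowelA c) with
              | none => cs
              | some i =>
                match (cs.drop i).findIdx? (fun c => !pvIsVowelA c) with
                | none => cs
                | some d => cs.take (i + d + 1)) := by
  induction cs generalizing acc with
  | nil => simp [pvLoopA]
  | cons c rest ih =>
    by_cases hv : pvIsVowelA c = true
    · simp [pvLoopA, hv, List.findIdx?_cons, pvLoopA_true]
      cases rest.findIdx? (fun c => !pvIsVowelA c) <;> simp
    · simp at hv
      simp [pvLoopA, hv, List.findIdx?_cons, ih]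
      cases h : rest.findIdx? (fun c => pvIsVowelA c) with
      | none => simp
      | some i =>
        simp
        cases (rest.drop i).findIdx? (fun c => !pvIsVowelA c) <;>
          simp [Nat.add_right_comm]

-- ===== VERDICT (by name: the statement is the Claim_ definition above) =====
theorem extract_first_syllable_py_spec : Claim_equal_extract_first_syllable_py := by
  intro text _ _
  unfold Spec_extract_first_syllable_py extract_first_syllable_py extract_first_syllable_py_alt
  by_cases h : text = ""
  · simp [h]
  · simp only [if_neg h, pvIsVowelB_eq]
    generalize (if PySem.Str.isIn " " text then
        (match PySem.Str.split₀ text with | w :: _ => w | [] => "") else text) = w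
    rw [pvLoopA_false]
    cases h1 : w.toList.findIdx? (fun c => pvIsVowelA c) with
    | none => simp [String.ofList_toList]
    | some i =>
      cases h2 : (w.toList.drop i).findIdx? (fun c => !pvIsVowelA c) <;> simp [h2, String.ofList_toList]
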